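-- pv_equiv track=rewrite | github.com/iAlexeyRu/openclaw-alex | scripts/bench_url_lightpanda.py | extract_heading
-- ===== SOURCE A (Python) =====
-- def extract_heading(markdown: str) -> str | None:
--     lines = [line.strip() for line in markdown.splitlines() if line.strip()]
--     for line in lines:
--         if line.startswith("#"):
--             return line.lstrip("#").strip()
--     for line in lines:
--         if line.startswith(("![", "[", "- ")):
--             continue
--         if len(line) < 10:
--             continue
--         return line[:200]
--     for line in lines:
--         return line[:200]
--     return None
-- ===== SOURCE B (Python) =====
-- def extract_heading(markdown: str) -> str | None:
--     heading = para = first = None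
--     for raw in markdown.splitlines():
--         line = raw.strip()
--         if not line:
--             continue
--         if first is None:
--             first = line[:200]
--         if line.startswith("#"):
--             heading = line.lstrip("#").strip()
--             break
--         if para is None and not line.startswith(("![", "[", "- ")) and len(line) >= 10:
--             para = line[:200]
--     if heading is not None:
--         return heading
--     if para is not None:
--         return para
--     return first
-- ===== Notes on version B (the rewrite author's own statement) =====
-- stated objective: simpler
-- what changed: A makes three successive passes over the cleaned line list; B makes a single pass over the raw lines keeping first-seen heading/paragraph/first-line candidates (exiting early on a heading) and picks by priority at the end.
import Mathlib
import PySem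

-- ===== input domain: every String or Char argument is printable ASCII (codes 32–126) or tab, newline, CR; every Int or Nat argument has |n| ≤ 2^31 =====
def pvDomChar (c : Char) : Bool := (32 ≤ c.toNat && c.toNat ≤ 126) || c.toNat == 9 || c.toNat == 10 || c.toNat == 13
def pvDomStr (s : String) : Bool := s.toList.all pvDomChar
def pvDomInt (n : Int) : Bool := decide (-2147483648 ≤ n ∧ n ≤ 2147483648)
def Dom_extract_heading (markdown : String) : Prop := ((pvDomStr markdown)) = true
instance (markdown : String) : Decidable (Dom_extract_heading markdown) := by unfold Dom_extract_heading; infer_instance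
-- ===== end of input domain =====

-- B replaces A's three successive passes over the cleaned lines by one pass keeping
-- first-seen heading/paragraph/first-line candidates (objective: simpler).

-- ===== PORT A =====
-- exact port of str.lstrip("#"): drop leading '#' characters (used by both Pythons)
def lstripHash (s : String) : String := String.ofList (s.toList.dropWhile (fun c => c == '#'))

-- [line.strip() for line in markdown.splitlines() if line.strip()]
def ehLines (markdown : String) : List String :=
  ((PySem.Str.splitlines markdown).map PySem.Str.strip).filter (fun l => l ≠ "")

def ehPass1 : List String → Option String
  | [] => none
  | l :: ls =>
    if PySem.Str.startswith l "#" then some (PySem.Str.strip (lstripHash l)) else ehPass1 ls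

def ehPass2 : List String → Option String
  | [] => none
  | l :: ls =>
    if PySem.Str.startswith l "![" || PySem.Str.startswith l "[" || PySem.Str.startswith l "- " then
      ehPass2 ls
    else if PySem.Str.len l < 10 then ehPass2 ls
    else some (PySem.Str.slice l none (some 200))

def ehPass3 : List String → Option String
  | [] => none
  | l :: _ => some (PySem.Str.slice l none (some 200))

def extract_heading (markdown : String) : Option String :=
  let lines := ehLines markdown
  match ehPass1 lines with
  | some r => some r
  | none =>
    match ehPass2 lines with
    | some r => some r
    | none => ehPass3 lines

-- ===== PORT B =====
def ehScanB : List String → Option String → Option String → Option String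
  | [], para, first =>
    (match para with
     | some p => some p
     | none => first)
  | raw :: rest, para, first =>
    let line := PySem.Str.strip raw
    if line = "" then ehScanB rest para first
    else
      let first' := match first with
        | none => some (PySem.Str.slice line none (some 200))
        | some f => some f
      if PySem.Str.startswith line "#" then
        some (PySem.Str.strip (lstripHash line))
      else
        let para' := match para with
          | none =>
            if !(PySem.Str.startswith line "![" || PySem.Str.startswith line "[" || PySem.Str.startswith line "- ")
                && 10 ≤ PySem.Str.len line then
              some (PySem.Str.slice line none (some 200))
            else none
          | some p => some p
        ehScanB rest para' first'

def extract_heading_alt (markdown : String) : Option String :=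
  ehScanB (PySem.Str.splitlines markdown) none none

-- ===== PRECONDITION & SPEC =====
def Spec_extract_heading (markdown : String) (out : Option String) : Prop := out = extract_heading_alt markdown
instance (markdown : String) (out : Option String) : Decidable (Spec_extract_heading markdown out) := by unfold Spec_extract_heading; infer_instance

-- ===== CLAIM (what is proved, stated in full; the proofs are below) =====
def Claim_equal_extract_heading : Prop := ∀ (markdown : String), Dom_extract_heading markdown → Spec_extract_heading markdown (extract_heading markdown)

-- ===== LEMMAS AND PROOFS =====

def ehLines' (ls : List String) : List String :=
  (ls.map PySem.Str.strip).filter (fun l => l ≠ "")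

theorem ehLines'_cons (raw : String) (ls : List String) :
    ehLines' (raw :: ls) =
      if PySem.Str.strip raw = "" then ehLines' ls else PySem.Str.strip raw :: ehLines' ls := by
  simp only [ehLines', List.map_cons, List.filter_cons]
  split_ifs with h <;> simp_all

theorem ehPass1_cons (l : String) (ls : List String) :
    ehPass1 (l :: ls) =
      if PySem.Str.startswith l "#" = true then some (PySem.Str.strip (lstripHash l))
      else ehPass1 ls := rfl

theorem ehPass2_cons (l : String) (ls : List String) :
    ehPass2 (l :: ls) =
      if (PySem.Str.startswith l "![" || PySem.Str.startswith l "[" || PySem.Str.startswith l "- ") = true then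
        ehPass2 ls
      else if PySem.Str.len l < 10 then ehPass2 ls
      else some (PySem.Str.slice l none (some 200)) := rfl

theorem ehPass3_cons (l : String) (ls : List String) :
    ehPass3 (l :: ls) = some (PySem.Str.slice l none (some 200)) := rfl

theorem ehScanB_cons (raw : String) (rest : List String) (para first : Option String) :
    ehScanB (raw :: rest) para first =
      if PySem.Str.strip raw = "" then ehScanB rest para first
      else if PySem.Str.startswith (PySem.Str.strip raw) "#" = true then
        some (PySem.Str.strip (lstripHash (PySem.Str.strip raw)))
      else
        ehScanB rest
          (para.or
            (if (!(PySem.Str.startswith (PySem.Str.strip raw) "![" ||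
                   PySem.Str.startswith (PySem.Str.strip raw) "[" ||
                   PySem.Str.startswith (PySem.Str.strip raw) "- ")
                 && 10 ≤ PySem.Str.len (PySem.Str.strip raw)) = true then
               some (PySem.Str.slice (PySem.Str.strip raw) none (some 200))
             else none))
          (first.or (some (PySem.Str.slice (PySem.Str.strip raw) none (some 200)))) := by
  cases para <;> cases first <;>
    simp only [ehScanB, Option.some_or, Option.none_or]

theorem ehScanB_eq (ls : List String) (para first : Option String) :
    ehScanB ls para first =
      ((ehPass1 (ehLines' ls)).or
        ((para.or (ehPass2 (ehLines' ls))).or (first.or (ehPass3 (ehLines' ls))))) := by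
  induction ls generalizing para first with
  | nil =>
    show (match para with | some p => some p | none => first) = _
    cases para <;> cases first <;> rfl
  | cons raw rest ih =>
    rw [ehScanB_cons, ehLines'_cons]
    by_cases h0 : PySem.Str.strip raw = ""
    · rw [if_pos h0, if_pos h0, ih]
    · rw [if_neg h0, if_neg h0, ehPass1_cons, ehPass2_cons, ehPass3_cons]
      by_cases hh : PySem.Str.startswith (PySem.Str.strip raw) "#" = true
      · rw [if_pos hh, if_pos hh, Option.some_or]
      · rw [if_neg hh, if_neg hh, ih]
        have hpara :
            (if (!(PySem.Str.startswith (PySem.Str.strip raw) "![" ||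
                   PySem.Str.startswith (PySem.Str.strip raw) "[" ||
                   PySem.Str.startswith (PySem.Str.strip raw) "- ")
                 && 10 ≤ PySem.Str.len (PySem.Str.strip raw)) = true then
               some (PySem.Str.slice (PySem.Str.strip raw) none (some 200))
             else none).or (ehPass2 (ehLines' rest)) =
              (if (PySem.Str.startswith (PySem.Str.strip raw) "![" ||
                   PySem.Str.startswith (PySem.Str.strip raw) "[" ||
                   PySem.Str.startswith (PySem.Str.strip raw) "- ") = true then
                 ehPass2 (ehLines' rest)
               else if PySem.Str.len (PySem.Str.strip raw) < 10 then ehPass2 (ehLines' rest)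
               else some (PySem.Str.slice (PySem.Str.strip raw) none (some 200))) := by
          by_cases hsk : (PySem.Str.startswith (PySem.Str.strip raw) "![" ||
              PySem.Str.startswith (PySem.Str.strip raw) "[" ||
              PySem.Str.startswith (PySem.Str.strip raw) "- ") = true
          · rw [if_neg (by rw [hsk]; simp), Option.none_or, if_pos hsk]
          · simp only [Bool.not_eq_true] at hsk
            by_cases hl : 10 ≤ PySem.Str.len (PySem.Str.strip raw)
            · rw [if_pos (by rw [hsk]; simpa using hl), Option.some_or,
                if_neg (by rw [hsk]; simp), if_neg (by omega)]
            · rw [if_neg (by rw [hsk]; simpa using hl), Option.none_or,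
                if_neg (by rw [hsk]; simp), if_pos (by omega)]
        have h2 : (para.or (if (!(PySem.Str.startswith (PySem.Str.strip raw) "![" ||
                   PySem.Str.startswith (PySem.Str.strip raw) "[" ||
                   PySem.Str.startswith (PySem.Str.strip raw) "- ")
                 && 10 ≤ PySem.Str.len (PySem.Str.strip raw)) = true then
               some (PySem.Str.slice (PySem.Str.strip raw) none (some 200))
             else none)).or (ehPass2 (ehLines' rest)) = para.or (if (PySem.Str.startswith (PySem.Str.strip raw) "![" ||
                   PySem.Str.startswith (PySem.Str.strip raw) "[" ||
                   PySem.Str.startswith (PySem.Str.strip raw) "- ") = true then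
                 ehPass2 (ehLines' rest)
               else if PySem.Str.len (PySem.Str.strip raw) < 10 then ehPass2 (ehLines' rest)
               else some (PySem.Str.slice (PySem.Str.strip raw) none (some 200))) := by
          rw [Option.or_assoc, hpara]
        have h3 : (first.or (some (PySem.Str.slice (PySem.Str.strip raw) none (some 200)))).or (ehPass3 (ehLines' rest)) = first.or (some (PySem.Str.slice (PySem.Str.strip raw) none (some 200))) := by
          rw [Option.or_assoc, Option.some_or]
        rw [h2, h3]

theorem ehLines_eq (markdown : String) :
    ehLines markdown = ehLines' (PySem.Str.splitlines markdown) := rfl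

theorem extract_heading_or (markdown : String) :
    extract_heading markdown =
      ((ehPass1 (ehLines markdown)).or
        ((ehPass2 (ehLines markdown)).or (ehPass3 (ehLines markdown)))) := by
  unfold extract_heading
  rcases h1 : ehPass1 (ehLines markdown) with _ | r1 <;>
    rcases h2 : ehPass2 (ehLines markdown) with _ | r2 <;>
      rcases h3 : ehPass3 (ehLines markdown) with _ | r3 <;>
        simp [h1, h2, h3]

-- ===== VERDICT (by name: the statement is the Claim_ definition above) =====
theorem extract_heading_spec : Claim_equal_extract_heading := by
  intro markdown _
  unfold Spec_extract_heading extract_heading_alt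
  rw [ehScanB_eq, extract_heading_or, ehLines_eq]
  simp only [Option.none_or]
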